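-- pv_equiv track=rewrite | github.com/Sergkon99/rest-api | checker.py | check_fields_for_update
-- ===== SOURCE A (Python) =====
-- def check_fields_for_update(data: dict):
--     field_exist = False
--     for field in data:
--         if field in ('town', 'street', 'building', 'name', 'birth_date',
--                      'gender', 'relatives', 'apartment'):
--             field_exist = True
--             if data[field] is None:
--                 return False
--     return field_exist
-- ===== SOURCE B (Python) =====
-- FIELDS = ('town', 'street', 'building', 'name', 'birth_date',
--           'gender', 'relatives', 'apartment')
--
--
-- def check_fields_for_update(data: dict):
--     # Iterate the fixed field tuple (not the input's keys), gather the values of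
--     # the recognized fields that are present, then test the gathered list.
--     values = [data[f] for f in FIELDS if f in data]
--     return bool(values) and None not in values
-- ===== Notes on version B (the rewrite author's own statement) =====
-- stated objective: alternative
-- what changed: B inverts the traversal: instead of A's loop over the input's keys with a mutable flag, membership test against the field tuple and early return, B iterates the fixed tuple of known fields, gathers the values of those present into a list, and returns that the list is non-empty and free of None.
import Mathlib
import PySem

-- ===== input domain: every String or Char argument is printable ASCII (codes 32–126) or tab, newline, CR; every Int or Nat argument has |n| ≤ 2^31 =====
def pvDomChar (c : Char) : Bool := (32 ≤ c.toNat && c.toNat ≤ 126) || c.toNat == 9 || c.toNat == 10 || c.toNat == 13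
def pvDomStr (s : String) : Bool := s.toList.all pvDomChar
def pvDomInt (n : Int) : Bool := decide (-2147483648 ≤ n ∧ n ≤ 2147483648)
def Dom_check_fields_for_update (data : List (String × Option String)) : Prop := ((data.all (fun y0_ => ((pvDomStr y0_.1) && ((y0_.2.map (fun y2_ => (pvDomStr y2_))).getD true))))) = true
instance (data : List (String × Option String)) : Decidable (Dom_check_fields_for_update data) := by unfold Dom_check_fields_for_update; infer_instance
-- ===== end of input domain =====

-- B inverts the traversal: it iterates the fixed tuple of known fields, gathers the values
-- of those present into a list, and tests that list (non-empty and None-free), instead of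
-- A's loop over the input's keys with a flag and early return (objective: alternative).

-- ===== PORT A =====
def pvAFields : List String :=
  ["town", "street", "building", "name", "birth_date", "gender", "relatives", "apartment"]

-- the for-loop of A: iterate the dict's keys, flag `field_exist`, early return on a None value
def pvAloop (data : List (String × Option String)) : List String → Bool → Bool
  | [], fieldExist => fieldExist
  | f :: rest, fieldExist =>
    if pvAFields.contains f then
      match (PySem.Dict.mk data).get? f with
      | some none => false
      | _ => pvAloop data rest true
    else pvAloop data rest fieldExist

def check_fields_for_update (data : List (String × Option String)) : Bool :=
  pvAloop data (data.map Prod.fst) false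

-- ===== PORT B =====
-- (B's FIELDS tuple is the same literal list as A's in-line tuple; shared as pvAFields)
-- values = [data[f] for f in FIELDS if f in data]; the .getD none is exact because the
-- filter keeps only keys present in the dict, where get? returns some value.
def check_fields_for_update_alt (data : List (String × Option String)) : Bool :=
  let d := PySem.Dict.mk data
  let values : List (Option String) :=
    (pvAFields.filter (fun f => d.contains f)).map (fun f => (d.get? f).getD none)
  !values.isEmpty && !values.contains none

-- ===== PRECONDITION & SPEC =====
def Spec_check_fields_for_update (data : List (String × Option String)) (out : Bool) : Prop := out = check_fields_for_update_alt data
instance (data : List (String × Option String)) (out : Bool) : Decidable (Spec_check_fields_for_update data out) := by unfold Spec_check_fields_for_update; infer_instance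

-- ===== CLAIM (what is proved, stated in full; the proofs are below) =====
def Claim_equal_check_fields_for_update : Prop := ∀ (data : List (String × Option String)), Dom_check_fields_for_update data → Spec_check_fields_for_update data (check_fields_for_update data)

-- ===== LEMMAS AND PROOFS =====

-- proof-side abbreviation: the value stored under f is literally None
def pvIsNone (data : List (String × Option String)) (f : String) : Bool :=
  match (PySem.Dict.mk data).get? f with
  | some none => true
  | _ => false

-- the B port with its two lets unfolded
lemma pvAlt_def (data : List (String × Option String)) :
    check_fields_for_update_alt data =
      (!((pvAFields.filter (fun f => (PySem.Dict.mk data).contains f)).map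
            (fun f => ((PySem.Dict.mk data).get? f).getD none)).isEmpty &&
       !((pvAFields.filter (fun f => (PySem.Dict.mk data).contains f)).map
            (fun f => ((PySem.Dict.mk data).get? f).getD none)).contains none) := rfl

lemma pvGet_isSome_iff (data : List (String × Option String)) (f : String) :
    ((PySem.Dict.mk data).get? f).isSome ↔ f ∈ data.map Prod.fst := by
  induction data with
  | nil => simp [PySem.Dict.get?]
  | cons p rest ih =>
    rw [List.map_cons,
      show (p : String × Option String) = (p.1, p.2) from rfl, PySem.Dict.get?_mk_cons]
    by_cases he : p.1 = f
    · simp [he]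
    · have hb : (p.1 == f) = false := by simp [he]
      simp [hb, ih]
      intro h
      exact absurd h.symm he

lemma pvAloop_char (data : List (String × Option String)) (ks : List String) (fe : Bool) :
    pvAloop data ks fe =
      if ks.any (fun f => pvAFields.contains f && pvIsNone data f) then false
      else (fe || ks.any (fun f => pvAFields.contains f)) := by
  induction ks generalizing fe with
  | nil => simp [pvAloop]
  | cons f rest ih =>
    have e : pvAloop data (f :: rest) fe =
        if pvAFields.contains f then
          match (PySem.Dict.mk data).get? f with
          | some none => false
          | _ => pvAloop data rest true
        else pvAloop data rest fe := rfl
    rw [e, List.any_cons, List.any_cons]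
    by_cases hc : pvAFields.contains f = true
    · rw [if_pos hc, hc]
      cases hg : (PySem.Dict.mk data).get? f with
      | none =>
        have hn : pvIsNone data f = false := by simp [pvIsNone, hg]
        rw [ih, hn]
        cases hrb : rest.any (fun f => pvAFields.contains f && pvIsNone data f) <;> simp
      | some v =>
        cases v with
        | none =>
          have hn : pvIsNone data f = true := by simp [pvIsNone, hg]
          rw [hn]; simp
        | some s =>
          have hn : pvIsNone data f = false := by simp [pvIsNone, hg]
          rw [ih, hn]
          cases hrb : rest.any (fun f => pvAFields.contains f && pvIsNone data f) <;> simp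
    · have hc' : pvAFields.contains f = false := by
        cases h : pvAFields.contains f
        · rfl
        · exact absurd h hc
      rw [if_neg hc, hc', ih]
      cases hrb : rest.any (fun f => pvAFields.contains f && pvIsNone data f) <;> simp

lemma pvMemL (data : List (String × Option String)) (f : String) :
    f ∈ pvAFields.filter (fun f => (PySem.Dict.mk data).contains f) ↔
      f ∈ pvAFields ∧ f ∈ data.map Prod.fst := by
  rw [List.mem_filter, ← pvGet_isSome_iff, PySem.Dict.contains_eq_isSome_get?]

-- ===== VERDICT (by name: the statement is the Claim_ definition above) =====
theorem check_fields_for_update_spec : Claim_equal_check_fields_for_update := by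
  intro data _
  unfold Spec_check_fields_for_update check_fields_for_update
  rw [pvAloop_char, pvAlt_def]
  by_cases hbad : ∃ f ∈ data.map Prod.fst, pvAFields.contains f = true ∧ pvIsNone data f = true
  · obtain ⟨f, hf, hk, hn⟩ := hbad
    have h1 : (data.map Prod.fst).any (fun f => pvAFields.contains f && pvIsNone data f) = true :=
      List.any_eq_true.mpr ⟨f, hf, by rw [hk, hn]; rfl⟩
    rw [if_pos h1]
    have hfL : f ∈ pvAFields.filter (fun f => (PySem.Dict.mk data).contains f) :=
      (pvMemL data f).2 ⟨by simpa using hk, hf⟩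
    have hgn : (PySem.Dict.mk data).get? f = some none := by
      unfold pvIsNone at hn
      revert hn
      cases hg : (PySem.Dict.mk data).get? f with
      | none => simp
      | some v => cases v <;> simp
    have hcont : ((pvAFields.filter (fun f => (PySem.Dict.mk data).contains f)).map
        (fun f => ((PySem.Dict.mk data).get? f).getD none)).contains none = true := by
      rw [List.contains_eq_any_beq, List.any_map, List.any_eq_true]
      exact ⟨f, hfL, by simp [hgn]⟩
    rw [hcont]
    simp
  · have h1 : (data.map Prod.fst).any (fun f => pvAFields.contains f && pvIsNone data f) = false := by
      rw [List.any_eq_false]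
      intro f hf h
      rw [Bool.and_eq_true] at h
      exact hbad ⟨f, hf, h.1, h.2⟩
    rw [if_neg (by rw [h1]; simp), Bool.false_or]
    by_cases hk : ∃ f ∈ data.map Prod.fst, pvAFields.contains f = true
    · obtain ⟨f, hf, hkf⟩ := hk
      have hA : (data.map Prod.fst).any (fun f => pvAFields.contains f) = true :=
        List.any_eq_true.mpr ⟨f, hf, hkf⟩
      have hfL : f ∈ pvAFields.filter (fun f => (PySem.Dict.mk data).contains f) :=
        (pvMemL data f).2 ⟨by simpa using hkf, hf⟩
      have hne : ((pvAFields.filter (fun f => (PySem.Dict.mk data).contains f)).map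
          (fun f => ((PySem.Dict.mk data).get? f).getD none)).isEmpty = false := by
        cases hp : pvAFields.filter (fun f => (PySem.Dict.mk data).contains f) with
        | nil => rw [hp] at hfL; simp at hfL
        | cons a l => rfl
      have hcont : ((pvAFields.filter (fun f => (PySem.Dict.mk data).contains f)).map
          (fun f => ((PySem.Dict.mk data).get? f).getD none)).contains none = false := by
        rw [List.contains_eq_any_beq, List.any_map, List.any_eq_false]
        intro g hg
        obtain ⟨hgB, hgmem⟩ := (pvMemL data g).1 hg
        have hgk : pvAFields.contains g = true := by simpa using hgB
        have hno : pvIsNone data g = false := by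
          cases h : pvIsNone data g
          · rfl
          · exact absurd ⟨g, hgmem, hgk, h⟩ hbad
        have hsome : ((PySem.Dict.mk data).get? g).isSome :=
          (pvGet_isSome_iff data g).2 hgmem
        unfold pvIsNone at hno
        revert hno hsome
        cases hgq : (PySem.Dict.mk data).get? g with
        | none => simp
        | some v => cases v <;> simp [hgq]
      rw [hA, hne, hcont]
      rfl
    · have hA : (data.map Prod.fst).any (fun f => pvAFields.contains f) = false := by
        rw [List.any_eq_false]
        intro f hf h
        exact hk ⟨f, hf, h⟩
      have hemp : (pvAFields.filter (fun f => (PySem.Dict.mk data).contains f)) = [] := by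
        cases hp : pvAFields.filter (fun f => (PySem.Dict.mk data).contains f) with
        | cons a l =>
          have hma : a ∈ pvAFields.filter (fun f => (PySem.Dict.mk data).contains f) := by
            rw [hp]; exact List.mem_cons_self
          obtain ⟨haB, hamem⟩ := (pvMemL data a).1 hma
          rw [List.any_eq_false] at hA
          exact absurd (by simpa using haB) (hA a hamem)
        | nil => rfl
      rw [hA, hemp]
      rfl
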